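-- pv_equiv track=rewrite | github.com/lxylxy123456/CodeJam2021 | QualificationRound/mu.py | solve_normal
-- ===== SOURCE A (Python) =====
-- def solve_normal(X, Y, S):
-- 	prev = 'X'
-- 	ans = 0
-- 	for i in S:
-- 		if i == 'C':
-- 			if prev == 'J':
-- 				ans += Y
-- 			prev = i
-- 		elif i == 'J':
-- 			if prev == 'C':
-- 				ans += X
-- 			prev = i
-- 	return ans
-- ===== SOURCE B (Python) =====
-- def solve_normal(X, Y, S):
--     # Divide and conquer: filter down to the relevant C/J subsequence, then
--     # recursively split it in half; the total cost of a segment is the cost of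
--     # its two halves plus the cost of the single boundary transition.
--     rel = [c for c in S if c == 'C' or c == 'J']
--
--     def go(seg):
--         if len(seg) < 2:
--             return 0
--         mid = len(seg) // 2
--         left, right = seg[:mid], seg[mid:]
--         a, b = left[-1], right[0]
--         boundary = X if (a, b) == ('C', 'J') else Y if (a, b) == ('J', 'C') else 0
--         return go(left) + go(right) + boundary
--
--     return go(rel)
-- ===== Notes on version B (the rewrite author's own statement) =====
-- stated objective: alternative
-- what changed: Replaces A's single stateful prev-tracking pass with a divide-and-conquer recursion: filter S to the relevant C/J subsequence, then recursively halve it and combine the two half-costs with the one boundary-transition cost.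
import Mathlib
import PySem

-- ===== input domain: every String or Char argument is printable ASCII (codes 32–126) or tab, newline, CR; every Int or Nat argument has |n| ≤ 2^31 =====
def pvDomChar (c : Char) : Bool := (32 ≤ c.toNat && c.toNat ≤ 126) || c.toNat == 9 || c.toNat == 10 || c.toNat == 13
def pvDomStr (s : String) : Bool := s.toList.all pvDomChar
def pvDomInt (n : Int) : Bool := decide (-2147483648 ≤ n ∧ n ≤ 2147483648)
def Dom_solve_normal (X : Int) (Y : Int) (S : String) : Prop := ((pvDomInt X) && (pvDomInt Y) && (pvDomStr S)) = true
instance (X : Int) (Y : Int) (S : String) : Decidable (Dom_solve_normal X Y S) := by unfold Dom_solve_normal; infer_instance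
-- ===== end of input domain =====

-- B replaces A's single stateful prev-tracking pass by a divide-and-conquer recursion
-- over the filtered C/J subsequence; return value only, no side effects.

-- ===== PORT A =====
-- loop body of A: state is (prev, ans)
def solveStepA (X : Int) (Y : Int) (s : Char × Int) (i : Char) : Char × Int :=
  if i = 'C' then (i, if s.1 = 'J' then s.2 + Y else s.2)
  else if i = 'J' then (i, if s.1 = 'C' then s.2 + X else s.2)
  else s

def solve_normal (X : Int) (Y : Int) (S : String) : Int :=
  (S.toList.foldl (solveStepA X Y) ('X', 0)).2

-- ===== PORT B =====
-- cost of the boundary transition (B's conditional expression)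
def pvBCost (X : Int) (Y : Int) (a : Char) (b : Char) : Int :=
  if a = 'C' ∧ b = 'J' then X else if a = 'J' ∧ b = 'C' then Y else 0

-- Source B's `go`: len(seg)//2 on a Python length is exactly Nat division; the slices
-- seg[:mid], seg[mid:] with 0 ≤ mid ≤ len are exactly take/drop; seg[-1]/seg[0] on the
-- nonempty halves are exactly getLast?/head? (the `none` branch is unreachable, kept
-- only to make the match total).
def goB (X : Int) (Y : Int) (seg : List Char) : Int :=
  if seg.length < 2 then 0
  else
    let mid := seg.length / 2
    let left := seg.take mid
    let right := seg.drop mid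
    let boundary :=
      match left.getLast?, right.head? with
      | some a, some b => pvBCost X Y a b
      | _, _ => 0
    goB X Y left + goB X Y right + boundary
termination_by seg.length
decreasing_by
  all_goals simp only [List.length_take, List.length_drop]; omega

def solve_normal_alt (X : Int) (Y : Int) (S : String) : Int :=
  goB X Y (S.toList.filter (fun c => c == 'C' || c == 'J'))

-- ===== PRECONDITION & SPEC =====
def Spec_solve_normal (X : Int) (Y : Int) (S : String) (out : Int) : Prop := out = solve_normal_alt X Y S
instance (X : Int) (Y : Int) (S : String) (out : Int) : Decidable (Spec_solve_normal X Y S out) := by unfold Spec_solve_normal; infer_instance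

-- ===== CLAIM (what is proved, stated in full; the proofs are below) =====
def Claim_equal_solve_normal : Prop := ∀ (X : Int) (Y : Int) (S : String), Dom_solve_normal X Y S → Spec_solve_normal X Y S (solve_normal X Y S)

-- ===== LEMMAS AND PROOFS =====

-- sum of transition costs along p :: l (the common semantic yardstick)
def pvZSum (X : Int) (Y : Int) : Char → List Char → Int
  | _, [] => 0
  | p, c :: t => pvBCost X Y p c + pvZSum X Y c t

-- pairwise transition-cost sum of a list
def pairSum (X : Int) (Y : Int) : List Char → Int
  | [] => 0
  | a :: t => pvZSum X Y a t

-- A's fold ignores irrelevant characters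
theorem foldA_filter (X Y : Int) (l : List Char) (p : Char) (a : Int) :
    l.foldl (solveStepA X Y) (p, a) =
      (l.filter (fun c => c == 'C' || c == 'J')).foldl (solveStepA X Y) (p, a) := by
  induction l generalizing p a with
  | nil => rfl
  | cons c t ih =>
    by_cases hc : c = 'C'
    · subst hc; simp [List.foldl, solveStepA, List.filter, ih]
    · by_cases hj : c = 'J'
      · subst hj; simp [List.foldl, solveStepA, List.filter, ih]
      · simp [List.foldl, solveStepA, hc, hj, ih]

-- on a list of relevant characters, A's fold accumulates pvZSum
theorem foldA_zsum (X Y : Int) (l : List Char) (p : Char) (a : Int)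
    (h : ∀ c ∈ l, c = 'C' ∨ c = 'J') :
    (l.foldl (solveStepA X Y) (p, a)).2 = a + pvZSum X Y p l := by
  induction l generalizing p a with
  | nil => simp [pvZSum]
  | cons c t ih =>
    have hc := h c (by simp)
    have ht : ∀ d ∈ t, d = 'C' ∨ d = 'J' := fun d hd => h d (by simp [hd])
    rcases hc with hc | hc <;> subst hc <;>
      simp only [List.foldl, solveStepA, pvZSum] <;>
      by_cases hp1 : p = 'C' <;> by_cases hp2 : p = 'J' <;>
      simp_all [pvBCost] <;> omega

-- pvZSum splits across an append with a known boundary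
theorem zsum_append (X Y : Int) (l1 l2 : List Char) (p a b : Char)
    (h1 : (p :: l1).getLast? = some a) (h2 : l2.head? = some b) :
    pvZSum X Y p (l1 ++ l2) = pvZSum X Y p l1 + pvBCost X Y a b + pvZSum X Y b l2.tail := by
  induction l1 generalizing p with
  | nil =>
    simp at h1; subst h1
    cases l2 with
    | nil => simp at h2
    | cons c t =>
      simp at h2; subst h2
      simp [pvZSum]
      try ring
  | cons c t ih =>
    have h1' : (c :: t).getLast? = some a := by
      rw [List.getLast?_cons_cons] at h1
      cases t with
      | nil => simpa using h1
      | cons d u => simpa [List.getLast?_cons_cons] using h1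
    simp only [List.cons_append, pvZSum, ih c h1']
    ring

-- pairSum splits across an append of two nonempty lists
theorem pairSum_append (X Y : Int) (l1 l2 : List Char) (a b : Char)
    (h1 : l1.getLast? = some a) (h2 : l2.head? = some b) :
    pairSum X Y (l1 ++ l2) = pairSum X Y l1 + pairSum X Y l2 + pvBCost X Y a b := by
  cases l1 with
  | nil => simp at h1
  | cons p t =>
    cases l2 with
    | nil => simp at h2
    | cons q u =>
      have hqb : q = b := by simpa using h2
      subst hqb
      simp only [List.cons_append, pairSum]
      rw [zsum_append X Y t (q :: u) p a q h1 (by simp)]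
      simp
      ring

-- B's divide-and-conquer computes the pairwise sum
theorem goB_pairSum (X Y : Int) (seg : List Char) : goB X Y seg = pairSum X Y seg := by
  induction hn : seg.length using Nat.strong_induction_on generalizing seg with
  | _ n ih =>
  subst hn
  rw [goB]
  by_cases h : seg.length < 2
  · rw [if_pos h]
    match seg, h with
    | [], _ => rfl
    | [c], _ => rfl
  · rw [if_neg h]
    have hlen : 2 ≤ seg.length := by omega
    have hmid1 : 1 ≤ seg.length / 2 := by omega
    have hmid2 : seg.length / 2 < seg.length := by omega
    have hl : (seg.take (seg.length / 2)).length = seg.length / 2 := by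
      simp; omega
    have hr : (seg.drop (seg.length / 2)).length = seg.length - seg.length / 2 := by simp
    have hlne : seg.take (seg.length / 2) ≠ [] := by
      intro he; rw [he] at hl; simp at hl; omega
    have hrne : seg.drop (seg.length / 2) ≠ [] := by
      intro he; rw [he] at hr; simp at hr; omega
    obtain ⟨a, ha⟩ := List.getLast?_isSome.mpr hlne |> Option.isSome_iff_exists.mp
    obtain ⟨b, hb⟩ : ∃ b, (seg.drop (seg.length / 2)).head? = some b := by
      cases hx : seg.drop (seg.length / 2) with
      | nil => exact absurd hx hrne
      | cons c t => exact ⟨c, by simp⟩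
    simp only [ha, hb]
    rw [ih _ (by rw [hl]; omega) _ rfl, ih _ (by rw [hr]; omega) _ rfl]
    have hsplit : seg = seg.take (seg.length / 2) ++ seg.drop (seg.length / 2) :=
      (List.take_append_drop _ _).symm
    conv_rhs => rw [hsplit]
    try rw [pairSum_append X Y _ _ a b ha hb]
    try ring

-- ===== VERDICT (by name: the statement is the Claim_ definition above) =====
theorem solve_normal_spec : Claim_equal_solve_normal := by
  intro X Y S _
  unfold Spec_solve_normal solve_normal solve_normal_alt
  rw [foldA_filter, goB_pairSum]
  have hmem : ∀ c ∈ (S.toList.filter fun c => c == 'C' || c == 'J'), c = 'C' ∨ c = 'J' := by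
    intro c hc
    rw [List.mem_filter] at hc
    rcases hc with ⟨_, h⟩
    simpa using h
  generalize hg : (S.toList.filter fun c => c == 'C' || c == 'J') = rel at hmem ⊢
  rw [foldA_zsum X Y rel 'X' 0 hmem]
  cases rel with
  | nil => simp [pvZSum, pairSum]
  | cons c t =>
    have hc := hmem c (by simp)
    have h0 : pvBCost X Y 'X' c = 0 := by
      rcases hc with hc | hc <;> subst hc <;> rfl
    simp only [pvZSum, pairSum, h0]
    try omega
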